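-- pv_equiv track=rewrite | github.com/myesilbagli/sec_filing_bot | main.py | _group_by_cik_form_date
-- ===== SOURCE A (Python) =====
-- def _group_by_cik_form_date(filings: list[dict]) -> list[list[dict]]:
--     """Group filings by (cik, form_type, filing_date). Return list of groups, each group a list of filing dicts."""
--     from collections import defaultdict
--     groups_map: dict[tuple[str, str, str], list[dict]] = defaultdict(list)
--     for f in filings:
--         key = (f.get("cik") or "", f.get("form_type") or "", f.get("filing_date") or "")
--         groups_map[key].append(f)
--     # Order by date desc, then cik, so most recent first.
--     sorted_keys = sorted(
--         groups_map.keys(),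
--         key=lambda k: (k[2], k[0]),
--         reverse=True,
--     )
--     return [groups_map[k] for k in sorted_keys]
-- ===== SOURCE B (Python) =====
-- def _group_by_cik_form_date(filings: list[dict]) -> list[list[dict]]:
--     """Group filings by (cik, form_type, filing_date). Return list of groups, most recent first."""
--     ordered = sorted(
--         filings,
--         key=lambda f: ((f.get("filing_date") or ""), (f.get("cik") or "")),
--         reverse=True,
--     )
--     groups: dict[tuple[str, str, str], list[dict]] = {}
--     for f in ordered:
--         key = (f.get("cik") or "", f.get("form_type") or "", f.get("filing_date") or "")
--         groups.setdefault(key, []).append(f)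
--     return list(groups.values())
-- ===== Notes on version B (the rewrite author's own statement) =====
-- stated objective: alternative
-- what changed: B stably sorts the filings themselves by (filing_date, cik) descending up front and builds the groups in one insertion-ordered grouping pass over the sorted list, instead of grouping first and then sorting the group keys.
import Mathlib
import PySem

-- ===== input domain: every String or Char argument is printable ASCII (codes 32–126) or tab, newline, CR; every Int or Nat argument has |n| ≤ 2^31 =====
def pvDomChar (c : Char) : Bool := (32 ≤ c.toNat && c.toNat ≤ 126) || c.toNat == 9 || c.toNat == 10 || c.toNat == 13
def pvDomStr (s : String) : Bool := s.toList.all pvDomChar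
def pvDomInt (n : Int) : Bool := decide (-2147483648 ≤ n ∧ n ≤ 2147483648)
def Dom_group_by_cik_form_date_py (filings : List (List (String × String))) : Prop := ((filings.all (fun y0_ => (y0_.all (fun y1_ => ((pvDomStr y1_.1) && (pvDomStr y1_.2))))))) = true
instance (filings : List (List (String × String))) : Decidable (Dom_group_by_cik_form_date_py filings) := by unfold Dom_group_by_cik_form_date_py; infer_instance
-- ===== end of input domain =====

-- B sorts the filings themselves by (date, cik) descending first and groups in one ordered pass,
-- instead of grouping first and sorting the group keys afterwards (alternative decomposition, same results).

-- the key tuple (f.get("cik") or "", f.get("form_type") or "", f.get("filing_date") or "") — shared by both Pythons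
def pvKeyOf (f : List (String × String)) : String × String × String :=
  ((PySem.Dict.mk f).getD "cik" "", (PySem.Dict.mk f).getD "form_type" "", (PySem.Dict.mk f).getD "filing_date" "")

-- ===== PORT A =====
def group_by_cik_form_date_py (filings : List (List (String × String))) : List (List (List (String × String))) :=
  -- groups_map[key].append(f) on a defaultdict(list)
  let groups_map : PySem.Dict (String × String × String) (List (List (String × String))) :=
    filings.foldl (fun d f => d.modify (pvKeyOf f) [] (· ++ [f])) PySem.Dict.empty
  -- sorted(groups_map.keys(), key=lambda k: (k[2], k[0]), reverse=True)
  let sorted_keys := PySem.List.sorted2 groups_map.keys (fun k => k.2.2) (fun k => k.1) true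
  sorted_keys.map (fun k => groups_map.getD k [])

-- ===== PORT B =====
def group_by_cik_form_date_py_alt (filings : List (List (String × String))) : List (List (List (String × String))) :=
  -- sorted(filings, key=lambda f: ((f.get("filing_date") or ""), (f.get("cik") or "")), reverse=True)
  let ordered := PySem.List.sorted2 filings
    (fun f => (PySem.Dict.mk f).getD "filing_date" "") (fun f => (PySem.Dict.mk f).getD "cik" "") true
  -- groups.setdefault(key, []).append(f)
  let groups : PySem.Dict (String × String × String) (List (List (String × String))) :=
    ordered.foldl (fun d f => d.modify (pvKeyOf f) [] (· ++ [f])) PySem.Dict.empty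
  groups.values

-- ===== PRECONDITION & SPEC =====
def Spec_group_by_cik_form_date_py (filings : List (List (String × String))) (out : List (List (List (String × String)))) : Prop := out = group_by_cik_form_date_py_alt filings
instance (filings : List (List (String × String))) (out : List (List (List (String × String)))) : Decidable (Spec_group_by_cik_form_date_py filings out) := by unfold Spec_group_by_cik_form_date_py; infer_instance

-- ===== CLAIM (what is proved, stated in full; the proofs are below) =====
def Claim_equal_group_by_cik_form_date_py : Prop := ∀ (filings : List (List (String × String))), Dom_group_by_cik_form_date_py filings → Spec_group_by_cik_form_date_py filings (group_by_cik_form_date_py filings)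

-- ===== LEMMAS AND PROOFS =====

-- rank of a group key for the descending sort: the lexicographic pair (date, cik)
def pvRk (k : String × String × String) : Lex (String × String) := toLex (k.2.2, k.1)

-- sorted2 with two linear-order keys is sorted with the lexicographic pair key
theorem pv_sorted2_eq_sorted {α κ₁ κ₂ : Type} [LinearOrder κ₁] [LinearOrder κ₂]
    (xs : List α) (k1 : α → κ₁) (k2 : α → κ₂) (rev : Bool) :
    PySem.List.sorted2 xs k1 k2 rev = PySem.List.sorted xs (fun x => toLex (k1 x, k2 x)) rev := by
  unfold PySem.List.sorted2 PySem.List.sorted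
  have hbf : (fun a b : α => decide (k1 a < k1 b) || (!decide (k1 b < k1 a) && decide (k2 a < k2 b)))
      = (fun a b : α => decide ((toLex (k1 a, k2 a) : Lex (κ₁ × κ₂)) < toLex (k1 b, k2 b))) := by
    funext a b
    rcases lt_trichotomy (k1 a) (k1 b) with h | h | h
    · simp [Prod.Lex.lt_iff, h]
    · simp [Prod.Lex.lt_iff, h]
    · simp [Prod.Lex.lt_iff, h, lt_asymm h, (ne_of_gt h)]
  rw [hbf]

-- insertBy in span normal form
theorem pv_insertBy_span {α : Type} (bf : α → α → Bool) (x : α) (S : List α) :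
    PySem.List.insertBy bf x S
      = S.takeWhile (fun y => !bf x y) ++ x :: S.dropWhile (fun y => !bf x y) := by
  induction S with
  | nil => simp [PySem.List.insertBy]
  | cons y ys ih =>
    by_cases h : bf x y
    · simp [PySem.List.insertBy, h]
    · simp [PySem.List.insertBy, h, ih]

-- reverse-sorted of a snoc is an insertion into the reverse-sorted list
theorem pv_sorted_rev_append {α κ : Type} [LinearOrder κ] (ρ : α → κ) (l : List α) (x : α) :
    PySem.List.sorted (l ++ [x]) ρ true
      = PySem.List.insertBy (fun a b => decide (ρ b < ρ a)) x (PySem.List.sorted l ρ true) := by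
  rw [PySem.List.sorted_rev_eq_foldl_insertBy, PySem.List.sorted_rev_eq_foldl_insertBy,
    List.foldl_append]
  rfl

-- everything dropped by the insertion scan ranks strictly below x (needs descending sortedness)
theorem pv_dropWhile_lt {α κ : Type} [LinearOrder κ] (ρ : α → κ) (x : α) (S : List α)
    (hS : S.Pairwise (fun a b => ρ b ≤ ρ a)) :
    ∀ z ∈ S.dropWhile (fun y => !decide (ρ y < ρ x)), ρ z < ρ x := by
  induction S with
  | nil => simp
  | cons y ys ih =>
    rw [List.pairwise_cons] at hS
    by_cases h : ρ y < ρ x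
    · intro z hz
      rw [List.dropWhile_cons] at hz
      simp [h] at hz
      rcases hz with rfl | hz
      · exact h
      · exact lt_of_le_of_lt (hS.1 z hz) h
    · intro z hz
      rw [List.dropWhile_cons] at hz
      simp [h] at hz
      exact ih hS.2 z hz

-- stable sort does not disturb the subsequence of elements of one fixed rank
theorem pv_filter_sorted {α κ : Type} [LinearOrder κ] (ρ : α → κ) (p : α → Bool) (c : κ)
    (hp : ∀ y, p y = true → ρ y = c) (l : List α) :
    (PySem.List.sorted l ρ true).filter p = l.filter p := by
  induction l using List.reverseRecOn with
  | nil => simp [PySem.List.sorted]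
  | append_singleton l x ih =>
    rw [pv_sorted_rev_append, pv_insertBy_span]
    have hS := PySem.List.sorted_pairwise_rev l ρ
    have hdw := pv_dropWhile_lt ρ x (PySem.List.sorted l ρ true) hS
    have hsplit : (PySem.List.sorted l ρ true).takeWhile (fun y => !decide (ρ y < ρ x)) ++
        (PySem.List.sorted l ρ true).dropWhile (fun y => !decide (ρ y < ρ x))
        = PySem.List.sorted l ρ true := List.takeWhile_append_dropWhile
    by_cases hx : p x
    · have hρx : ρ x = c := hp x hx
      have hdwf : ((PySem.List.sorted l ρ true).dropWhile (fun y => !decide (ρ y < ρ x))).filter p = [] := by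
        rw [List.filter_eq_nil_iff]
        intro z hz hpz
        exact absurd (hp z hpz ▸ hρx ▸ hdw z hz) (lt_irrefl _)
      rw [List.filter_append, List.filter_cons_of_pos hx, hdwf,
        List.filter_append, List.filter_cons_of_pos hx, List.filter_nil]
      have : (PySem.List.sorted l ρ true).filter p
          = ((PySem.List.sorted l ρ true).takeWhile (fun y => !decide (ρ y < ρ x))).filter p ++
            ((PySem.List.sorted l ρ true).dropWhile (fun y => !decide (ρ y < ρ x))).filter p := by
        rw [← List.filter_append, hsplit]
      rw [ih, this, hdwf] at *
      simp_all
    · rw [List.filter_append, List.filter_cons_of_neg hx, ← List.filter_append, hsplit, ih,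
        List.filter_append, List.filter_cons_of_neg hx, List.filter_nil, List.append_nil]

-- map commutes with sorting when the key factors through the map
theorem pv_insertBy_map {α β : Type} (g : β → α) (bf : α → α → Bool) (x : β) (S : List β) :
    (PySem.List.insertBy (fun a b => bf (g a) (g b)) x S).map g
      = PySem.List.insertBy bf (g x) (S.map g) := by
  induction S with
  | nil => simp [PySem.List.insertBy]
  | cons y ys ih =>
    by_cases h : bf (g x) (g y)
    · simp [PySem.List.insertBy, h]
    · simp [PySem.List.insertBy, h, ih]

theorem pv_foldl_insertBy_map {α β κ : Type} [LinearOrder κ] (g : β → α) (ρ : α → κ)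
    (l : List β) : ∀ acc : List β,
    (l.foldl (fun a x => PySem.List.insertBy (fun a b => decide (ρ (g b) < ρ (g a))) x a) acc).map g
      = (l.map g).foldl (fun a x => PySem.List.insertBy (fun a b => decide (ρ b < ρ a)) x a) (acc.map g) := by
  induction l with
  | nil => intro acc; simp
  | cons y l ih =>
    intro acc
    rw [List.foldl_cons, List.map_cons, List.foldl_cons, ih,
      pv_insertBy_map g (fun a b => decide (ρ b < ρ a)) y acc]

theorem pv_map_sorted {α β κ : Type} [LinearOrder κ] (g : β → α) (ρ : α → κ) (l : List β) :
    (PySem.List.sorted l (fun b => ρ (g b)) true).map g = PySem.List.sorted (l.map g) ρ true := by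
  rw [PySem.List.sorted_rev_eq_foldl_insertBy, PySem.List.sorted_rev_eq_foldl_insertBy]
  exact pv_foldl_insertBy_map g ρ l []

-- the fresh part a dedup fold appends
def pvNew {α : Type} [BEq α] (T : List α) : List α → List α
  | [] => []
  | z :: l' => if T.contains z then pvNew T l' else z :: pvNew (T ++ [z]) l'

theorem pv_foldl_add_eq_append {α : Type} [BEq α] (l : List α) : ∀ T : List α,
    List.foldl PySem.Set.add T l = T ++ pvNew T l := by
  induction l with
  | nil => intro T; simp [pvNew]
  | cons z l ih =>
    intro T
    by_cases h : T.contains z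
    · simp [PySem.Set.add, pvNew, h, ih]
    · simp [PySem.Set.add, pvNew, h, ih]

theorem pv_pvNew_congr {α : Type} [BEq α] (l : List α) : ∀ T₁ T₂ : List α,
    (∀ z ∈ l, T₁.contains z = T₂.contains z) → pvNew T₁ l = pvNew T₂ l := by
  induction l with
  | nil => intro _ _ _; rfl
  | cons z l ih =>
    intro T₁ T₂ h
    have hz := h z (by simp)
    by_cases h1 : T₁.contains z
    · rw [pvNew, pvNew, if_pos h1, if_pos (hz ▸ h1)]
      exact ih T₁ T₂ (fun w hw => h w (by simp [hw]))
    · rw [pvNew, pvNew, if_neg h1, if_neg (hz ▸ h1)]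
      refine congrArg _ (ih _ _ (fun w hw => ?_))
      simp only [List.contains_append, h w (by simp [hw])]

theorem pv_pvNew_subset {α : Type} [BEq α] (l : List α) : ∀ T : List α, ∀ z ∈ pvNew T l, z ∈ l := by
  induction l with
  | nil => simp [pvNew]
  | cons y l ih =>
    intro T z hz
    rw [pvNew] at hz
    split at hz
    · exact List.mem_cons_of_mem _ (ih T z hz)
    · rcases List.mem_cons.mp hz with rfl | hz2
      · simp
      · exact List.mem_cons_of_mem _ (ih _ z hz2)

theorem pv_insertBy_append_of_false {α : Type} (bf : α → α → Bool) (x : α) (T r : List α)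
    (h : ∀ y ∈ T, bf x y = false) :
    PySem.List.insertBy bf x (T ++ r) = T ++ PySem.List.insertBy bf x r := by
  induction T with
  | nil => simp
  | cons y T ih =>
    have hy := h y (by simp)
    simp [PySem.List.insertBy, hy, ih (fun z hz => h z (by simp [hz]))]

theorem pv_insertBy_of_forall_before {α : Type} (bf : α → α → Bool) (x : α) (r : List α)
    (h : ∀ z ∈ r, bf x z = true) : PySem.List.insertBy bf x r = x :: r := by
  cases r with
  | nil => rfl
  | cons z r => simp [PySem.List.insertBy, h z (by simp)]

-- dedup (first occurrences) commutes with the descending stable sort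
theorem pv_ofList_sorted {κ' κ : Type} [BEq κ'] [LawfulBEq κ'] [LinearOrder κ]
    (ρ : κ' → κ) (ks : List κ') :
    PySem.Set.ofList (PySem.List.sorted ks ρ true)
      = PySem.List.sorted (PySem.Set.ofList ks) ρ true := by
  induction ks using List.reverseRecOn with
  | nil => simp [PySem.List.sorted, PySem.Set.ofList, PySem.Set.empty]
  | append_singleton ks x ih =>
    have hS := PySem.List.sorted_pairwise_rev ks ρ
    have hsplit : (PySem.List.sorted ks ρ true).takeWhile (fun y => !decide (ρ y < ρ x)) ++
        (PySem.List.sorted ks ρ true).dropWhile (fun y => !decide (ρ y < ρ x))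
        = PySem.List.sorted ks ρ true := List.takeWhile_append_dropWhile
    have hdw := pv_dropWhile_lt ρ x (PySem.List.sorted ks ρ true) hS
    set tw := (PySem.List.sorted ks ρ true).takeWhile (fun y => !decide (ρ y < ρ x)) with htw
    set dw := (PySem.List.sorted ks ρ true).dropWhile (fun y => !decide (ρ y < ρ x)) with hdwdef
    have hofsnoc : PySem.Set.ofList (ks ++ [x]) = PySem.Set.add (PySem.Set.ofList ks) x := by
      simp [PySem.Set.ofList, List.foldl_append]
    have hLHS : PySem.Set.ofList (PySem.List.sorted (ks ++ [x]) ρ true)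
        = List.foldl PySem.Set.add (PySem.Set.add (PySem.Set.ofList tw) x) dw := by
      rw [pv_sorted_rev_append, pv_insertBy_span]
      simp only [PySem.Set.ofList, PySem.Set.empty, List.foldl_append, List.foldl_cons]
      rfl
    have hofS : PySem.Set.ofList (PySem.List.sorted ks ρ true)
        = List.foldl PySem.Set.add (PySem.Set.ofList tw) dw := by
      conv_lhs => rw [← hsplit]
      simp [PySem.Set.ofList, List.foldl_append]
    by_cases hx : x ∈ ks
    · -- the inserted copy lands after an existing equal element: dedup unchanged
      have hxS : x ∈ PySem.List.sorted ks ρ true := (PySem.List.mem_sorted ks ρ true x).mpr hx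
      have hxdw : x ∉ dw := fun h => lt_irrefl _ (hdw x h)
      have hxtw : x ∈ tw := by
        rcases List.mem_append.mp (hsplit ▸ hxS : x ∈ tw ++ dw) with h | h
        · exact h
        · exact absurd h hxdw
      have haddtw : PySem.Set.add (PySem.Set.ofList tw) x = PySem.Set.ofList tw := by
        simp [PySem.Set.add, List.contains_iff_mem, (PySem.Set.mem_ofList tw x).mpr hxtw]
      have haddks : PySem.Set.add (PySem.Set.ofList ks) x = PySem.Set.ofList ks := by
        simp [PySem.Set.add, List.contains_iff_mem, (PySem.Set.mem_ofList ks x).mpr hx]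
      rw [hLHS, haddtw, ← hofS, hofsnoc, haddks, ← ih]
    · -- a genuinely new element: it is inserted exactly where insertBy puts it in the dedup
      have hxS : x ∉ PySem.List.sorted ks ρ true :=
        fun h => hx ((PySem.List.mem_sorted ks ρ true x).mp h)
      have hxtw : x ∉ tw := fun h => hxS (hsplit ▸ List.mem_append_left dw h)
      have hxdw : x ∉ dw := fun h => hxS (hsplit ▸ List.mem_append_right tw h)
      have haddtw : PySem.Set.add (PySem.Set.ofList tw) x = PySem.Set.ofList tw ++ [x] := by
        simp only [PySem.Set.add]
        rw [if_neg]
        simp [List.contains_iff_mem, PySem.Set.mem_ofList, hxtw]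
      have haddks : PySem.Set.add (PySem.Set.ofList ks) x = PySem.Set.ofList ks ++ [x] := by
        simp only [PySem.Set.add]
        rw [if_neg]
        simp [List.contains_iff_mem, PySem.Set.mem_ofList, hx]
      have hnewcong : pvNew (PySem.Set.ofList tw ++ [x]) dw = pvNew (PySem.Set.ofList tw) dw := by
        apply pv_pvNew_congr
        intro z hz
        have hzx : (x == z) = false := by
          rw [beq_eq_false_iff_ne]
          rintro rfl
          exact hxdw hz
        simp [List.contains_append, hzx]
        rintro rfl
        simp at hzx
      rw [hLHS, haddtw, pv_foldl_add_eq_append, hnewcong]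
      rw [hofsnoc, haddks, pv_sorted_rev_append, ← ih, hofS, pv_foldl_add_eq_append]
      rw [pv_insertBy_append_of_false _ x _ _ ?hT, pv_insertBy_of_forall_before _ x _ ?hr]
      · simp
      case hT =>
        intro y hy
        have hytw : y ∈ tw := (PySem.Set.mem_ofList tw y).mp hy
        have := List.mem_takeWhile_imp (htw ▸ hytw)
        simpa using this
      case hr =>
        intro z hz
        simpa using hdw z (pv_pvNew_subset dw _ z hz)


-- A in closed form
theorem pv_A_closed (l : List (List (String × String))) :
    group_by_cik_form_date_py l
      = (PySem.List.sorted (PySem.Set.ofList (l.map pvKeyOf)) pvRk true).map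
          (fun c => l.filter (fun f => pvKeyOf f == c)) := by
  unfold group_by_cik_form_date_py
  dsimp only
  have hfold : l.foldl (fun d f => d.modify (pvKeyOf f) [] (· ++ [f]))
        (PySem.Dict.empty : PySem.Dict (String × String × String) (List (List (String × String))))
      = (l.map (fun f => (pvKeyOf f, f))).foldl (fun d p => d.modify p.1 [] (· ++ [p.2]))
        PySem.Dict.empty := by
    rw [List.foldl_map]
  have hgetD : ∀ c, (l.foldl (fun d f => d.modify (pvKeyOf f) [] (· ++ [f]))
        (PySem.Dict.empty : PySem.Dict (String × String × String) (List (List (String × String))))).getD c []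
      = l.filter (fun f => pvKeyOf f == c) := by
    intro c
    rw [hfold, PySem.Dict.getD_foldl_modify_append, List.filter_map]
    simp [Function.comp_def]
  have hkeys : (l.foldl (fun d f => d.modify (pvKeyOf f) [] (· ++ [f]))
        (PySem.Dict.empty : PySem.Dict (String × String × String) (List (List (String × String))))).keys
      = PySem.Set.ofList (l.map pvKeyOf) := by
    rw [PySem.Dict.keys_foldl_modify_key l pvKeyOf [] (fun _ x => fun v => v ++ [x])]
    simp [PySem.Set.update, PySem.Set.ofList, PySem.Set.empty, PySem.Dict.keys_empty]
  have hρ : (fun k : String × String × String => (toLex (k.2.2, k.1) : Lex (String × String))) = pvRk := rfl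
  rw [hkeys, pv_sorted2_eq_sorted, hρ]
  exact List.map_congr_left (fun c _ => hgetD c)

-- B in the same closed form
theorem pv_B_closed (l : List (List (String × String))) :
    group_by_cik_form_date_py_alt l
      = (PySem.List.sorted (PySem.Set.ofList (l.map pvKeyOf)) pvRk true).map
          (fun c => l.filter (fun f => pvKeyOf f == c)) := by
  unfold group_by_cik_form_date_py_alt
  dsimp only
  have hsort : PySem.List.sorted2 l
        (fun f => (PySem.Dict.mk f).getD "filing_date" "") (fun f => (PySem.Dict.mk f).getD "cik" "") true
      = PySem.List.sorted l (fun f => pvRk (pvKeyOf f)) true := by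
    rw [pv_sorted2_eq_sorted]
    rfl
  set s := PySem.List.sorted l (fun f => pvRk (pvKeyOf f)) true with hs
  rw [hsort]
  have hfold : s.foldl (fun d f => d.modify (pvKeyOf f) [] (· ++ [f]))
        (PySem.Dict.empty : PySem.Dict (String × String × String) (List (List (String × String))))
      = (s.map (fun f => (pvKeyOf f, f))).foldl (fun d p => d.modify p.1 [] (· ++ [p.2]))
        PySem.Dict.empty := by
    rw [List.foldl_map]
  have hgetD : ∀ c, (s.foldl (fun d f => d.modify (pvKeyOf f) [] (· ++ [f]))
        (PySem.Dict.empty : PySem.Dict (String × String × String) (List (List (String × String))))).getD c []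
      = l.filter (fun f => pvKeyOf f == c) := by
    intro c
    rw [hfold, PySem.Dict.getD_foldl_modify_append, List.filter_map]
    simp only [PySem.Dict.getD_empty, List.nil_append, Function.comp_def, List.map_map]
    have hfil : s.filter (fun f => pvKeyOf f == c) = l.filter (fun f => pvKeyOf f == c) := by
      rw [hs]
      exact pv_filter_sorted (fun f => pvRk (pvKeyOf f)) (fun f => pvKeyOf f == c) (pvRk c)
        (fun y hy => congrArg pvRk (eq_of_beq hy)) l
    rw [← hfil]
    simp
  have hkeys : (s.foldl (fun d f => d.modify (pvKeyOf f) [] (· ++ [f]))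
        (PySem.Dict.empty : PySem.Dict (String × String × String) (List (List (String × String))))).keys
      = PySem.List.sorted (PySem.Set.ofList (l.map pvKeyOf)) pvRk true := by
    rw [PySem.Dict.keys_foldl_modify_key s pvKeyOf [] (fun _ x => fun v => v ++ [x])]
    have h1 : PySem.Set.update (PySem.Dict.empty :
          PySem.Dict (String × String × String) (List (List (String × String)))).keys (s.map pvKeyOf)
        = PySem.Set.ofList (s.map pvKeyOf) := by
      simp [PySem.Set.update, PySem.Set.ofList, PySem.Set.empty, PySem.Dict.keys_empty]
    rw [h1, hs, pv_map_sorted pvKeyOf pvRk l, pv_ofList_sorted]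
  have hnodup : (s.foldl (fun d f => d.modify (pvKeyOf f) [] (· ++ [f]))
        (PySem.Dict.empty : PySem.Dict (String × String × String) (List (List (String × String))))).keys.Nodup := by
    apply PySem.Dict.nodup_keys_foldl_modify_key s pvKeyOf [] (fun _ x => fun v => v ++ [x])
    simp [PySem.Dict.keys_empty]
  rw [PySem.Dict.values_eq_map_keys _ hnodup [], hkeys]
  exact List.map_congr_left (fun c _ => hgetD c)

-- ===== VERDICT (by name: the statement is the Claim_ definition above) =====
theorem group_by_cik_form_date_py_spec : Claim_equal_group_by_cik_form_date_py := by
  intro filings _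
  unfold Spec_group_by_cik_form_date_py
  rw [pv_A_closed, pv_B_closed]
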